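-- pv_equiv track=rewrite | github.com/Shaunak54323/TextEncryption | Hill Cipher.py | getMessageMatrix
-- ===== SOURCE A (Python) =====
-- def getMessageMatrix(message, n):
--     if len(message) % n != 0:
--         message += ("0" * (n - (len(message) % n)))
--     k, matrix = 0, [[0] * n for i in range(len(message) // n)]
--     for i in range(len(message) // n):
--         for j in range(n):
--             matrix[i][j], k = ord(message[k]) % 65, k + 1
--     return matrix
-- ===== SOURCE B (Python) =====
-- def getMessageMatrix(message, n):
--     if len(message) % n != 0:
--         message += "0" * (n - len(message) % n)
--     codes = [ord(c) % 65 for c in message]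
--     return [codes[i:i + n] for i in range(0, len(codes), n)]
-- ===== Notes on version B (the rewrite author's own statement) =====
-- stated objective: simpler
-- what changed: Replaces the index-tracking nested loop that writes into a preallocated zero matrix with a single flat map of char codes followed by regrouping into rows via slices; the preallocated matrix, the running counter k and all in-place index assignments disappear.
-- outside the precondition, e.g. on getMessageMatrix('AB', 0): A raises ZeroDivisionError, B raises ZeroDivisionError
import Mathlib
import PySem

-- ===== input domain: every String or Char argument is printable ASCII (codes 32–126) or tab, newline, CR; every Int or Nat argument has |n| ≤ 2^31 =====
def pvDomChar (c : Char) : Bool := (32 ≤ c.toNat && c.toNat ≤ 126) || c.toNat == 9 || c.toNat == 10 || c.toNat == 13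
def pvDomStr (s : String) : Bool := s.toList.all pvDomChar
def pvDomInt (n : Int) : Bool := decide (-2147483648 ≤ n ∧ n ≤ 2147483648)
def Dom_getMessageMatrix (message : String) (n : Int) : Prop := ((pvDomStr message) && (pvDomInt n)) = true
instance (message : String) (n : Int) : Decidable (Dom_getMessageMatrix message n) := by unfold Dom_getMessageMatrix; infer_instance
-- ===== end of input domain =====

-- B re-implements A as a flat map of char codes followed by slicing into rows (simpler
-- decomposition, same cost); the two agree on every input with n ≠ 0 (n = 0 raises in both Pythons).

-- ===== PORT A =====
-- shared helper: both Python sources begin with the identical padding statement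
-- 'if len(message) % n != 0: message += "0" * (n - len(message) % n)'
def pvPad (cs : List Char) (n : Int) : List Char :=
  if PySem.Int.mod (cs.length : Int) n ≠ 0 then
    cs ++ PySem.List.pyRepeat ['0'] (n - PySem.Int.mod (cs.length : Int) n)
  else cs

-- A-side helper: ord(message[k]) % 65 (index always in range when A returns)
def pvCode (cs : List Char) (k : Int) : Int :=
  PySem.Int.mod ((PySem.List.pyGetD cs k 'A').toNat : Int) 65

-- A-side helper: the inner 'for j in range(n)' loop, state = (matrix, k)
def pvAinner (cs : List Char) (n i : Int) (st : List (List Int) × Int) : List (List Int) × Int :=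
  (PySem.List.pyRange 0 n 1).foldl
    (fun st j =>
      (PySem.List.pySetD st.1 i
        (PySem.List.pySetD (PySem.List.pyGetD st.1 i []) j (pvCode cs st.2)),
       st.2 + 1))
    st

def getMessageMatrix (message : String) (n : Int) : List (List Int) :=
  let cs := pvPad message.toList n
  let rows := PySem.Int.floordiv (cs.length : Int) n
  let matrix := (PySem.List.pyRange 0 rows 1).map (fun _ => PySem.List.pyRepeat [(0 : Int)] n)
  ((PySem.List.pyRange 0 rows 1).foldl (fun st i => pvAinner cs n i st) (matrix, 0)).1

-- ===== PORT B =====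
def getMessageMatrix_alt (message : String) (n : Int) : List (List Int) :=
  let cs := pvPad message.toList n
  let codes := cs.map (fun c => PySem.Int.mod ((c.toNat : Int)) 65)
  (PySem.List.pyRange 0 (codes.length : Int) n).map
    (fun i => PySem.List.slice codes (some i) (some (i + n)))

-- ===== PRECONDITION & SPEC =====
-- Pre_ excludes exactly n = 0, where both Pythons raise ZeroDivisionError on 'len(message) % n'.
def Pre_getMessageMatrix (message : String) (n : Int) : Prop := n ≠ 0
instance (message : String) (n : Int) : Decidable (Pre_getMessageMatrix message n) := by unfold Pre_getMessageMatrix; infer_instance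
def pvWitness_getMessageMatrix : String × Int := ("HELLO", 2)

def Spec_getMessageMatrix (message : String) (n : Int) (out : List (List Int)) : Prop := out = getMessageMatrix_alt message n
instance (message : String) (n : Int) (out : List (List Int)) : Decidable (Spec_getMessageMatrix message n out) := by unfold Spec_getMessageMatrix; infer_instance

-- ===== CLAIM (what is proved, stated in full; the proofs are below) =====
def Claim_equal_getMessageMatrix : Prop := ∀ (message : String) (n : Int), Dom_getMessageMatrix message n → Pre_getMessageMatrix message n → Spec_getMessageMatrix message n (getMessageMatrix message n)

-- ===== LEMMAS AND PROOFS =====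

-- a range with negative step and stop ≥ start is empty
lemma pyRange_neg_eq_nil (b s : Int) (hs : s < 0) (hb : 0 ≤ b) :
    PySem.List.pyRange 0 b s = [] := by
  simp only [PySem.List.pyRange]
  rw [if_neg (by omega), if_neg (by omega), if_neg (by omega)]
  simp

-- padding makes the length divisible
lemma pvPad_mod (cs : List Char) (n : Int) (hn : 0 < n) :
    ((pvPad cs n).length : Int) % n = 0 := by
  unfold pvPad
  rw [PySem.List.pyRepeat_singleton]
  split_ifs with h
  · rw [PySem.Int.mod_eq_emod_of_pos hn] at h
    have h1 : 0 ≤ (cs.length : Int) % n := Int.emod_nonneg _ (by omega)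
    have h2 : (cs.length : Int) % n < n := Int.emod_lt_of_pos _ hn
    have ht : ((n - (cs.length : Int) % n).toNat : Int) = n - (cs.length : Int) % n := by omega
    have key : (cs.length : Int) + (n - (cs.length : Int) % n) = n * ((cs.length : Int) / n + 1) := by
      have hd := Int.mul_ediv_add_emod (cs.length : Int) n
      linarith
    simp only [List.length_append, List.length_replicate]
    push_cast
    rw [PySem.Int.mod_eq_emod_of_pos hn, ht, key, Int.mul_emod_right]
  · rw [PySem.Int.mod_eq_emod_of_pos hn] at h
    omega

-- the first t steps of the inner loop write codes k0, k0+1, … into row r's first t slots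
lemma pvAinner_partial (cs : List Char) (n' : Nat) (r : Nat) :
    ∀ (t : Nat), t ≤ n' →
    ∀ (m : List (List Int)), r < m.length → ∀ (k0 : Int), m[r]! = List.replicate n' (0 : Int) →
    (PySem.List.pyRange 0 (t : Int) 1).foldl
      (fun st j =>
        (PySem.List.pySetD st.1 (r : Int)
          (PySem.List.pySetD (PySem.List.pyGetD st.1 (r : Int) []) j (pvCode cs st.2)),
         st.2 + 1)) (m, k0) =
      (m.set r ((List.range t).map (fun j : Nat => pvCode cs (k0 + (j : Int))) ++ List.replicate (n' - t) (0 : Int)),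
       k0 + t) := by
  intro t
  induction t with
  | zero =>
    intro _ m hr k0 hrow
    rw [PySem.List.pyRange_one_eq_nil (by omega)]
    simp only [List.foldl_nil, List.range_zero, List.map_nil, List.nil_append, Nat.sub_zero,
      Nat.cast_zero, add_zero]
    rw [← hrow, List.getElem!_eq_getElem?_getD, List.getElem?_eq_getElem hr, Option.getD_some,
      List.set_getElem_self]
  | succ t ih =>
    intro ht m hr k0 hrow
    have h1 : ((t + 1 : Nat) : Int) = (t : Int) + 1 := by push_cast; ring
    rw [h1, PySem.List.pyRange_one_succ_right (by omega), List.foldl_append,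
      ih (by omega) m hr k0 hrow]
    simp only [List.foldl_cons, List.foldl_nil]
    have hset : r < (m.set r ((List.range t).map (fun j : Nat => pvCode cs (k0 + (j : Int))) ++
        List.replicate (n' - t) (0 : Int))).length := by simpa using hr
    have hgr : (m.set r ((List.range t).map (fun j : Nat => pvCode cs (k0 + (j : Int))) ++
        List.replicate (n' - t) (0 : Int)))[r] =
        (List.range t).map (fun j : Nat => pvCode cs (k0 + (j : Int))) ++ List.replicate (n' - t) (0 : Int) :=
      List.getElem_set_self hset
    rw [PySem.List.pyGetD_natCast, PySem.List.pySetD_natCast, PySem.List.pySetD_natCast,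
      List.getD_eq_getElem _ _ hset, hgr, List.set_set]
    have hlen : ((List.range t).map (fun j : Nat => pvCode cs (k0 + (j : Int)))).length = t := by simp
    have hrep : List.replicate (n' - t) (0 : Int) = (0 : Int) :: List.replicate (n' - (t + 1)) 0 := by
      have : n' - t = (n' - (t + 1)) + 1 := by omega
      rw [this, List.replicate_succ]
    rw [List.set_append, if_neg (by omega), hlen, Nat.sub_self, hrep, List.set_cons_zero]
    congr 1
    · congr 1
      rw [List.range_succ, List.map_append, List.append_assoc]
      simp
    · ring

-- the full inner loop fills row r with the codes starting at k0
lemma pvAinner_spec (cs : List Char) (n' : Nat) (r : Nat)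
    (m : List (List Int)) (hr : r < m.length) (k0 : Int)
    (hrow : m[r]! = List.replicate n' (0 : Int)) :
    pvAinner cs (n' : Int) (r : Int) (m, k0) =
      (m.set r ((List.range n').map (fun j : Nat => pvCode cs (k0 + (j : Int)))), k0 + n') := by
  unfold pvAinner
  rw [pvAinner_partial cs n' r n' le_rfl m hr k0 hrow]
  simp

-- the outer loop: after r rows, the first r rows hold the codes and k = r * n'
lemma outer_spec (cs : List Char) (n' : Nat) (R : Nat) :
    ∀ (r : Nat), r ≤ R →
      (PySem.List.pyRange 0 (r : Int) 1).foldl (fun st i => pvAinner cs (n' : Int) i st)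
        (List.replicate R (List.replicate n' (0 : Int)), 0) =
      ((List.range r).map (fun i : Nat => (List.range n').map (fun j : Nat => pvCode cs ((i * n' + j : Nat) : Int)))
        ++ List.replicate (R - r) (List.replicate n' (0 : Int)),
       ((r * n' : Nat) : Int)) := by
  intro r
  induction r with
  | zero =>
    intro _
    rw [PySem.List.pyRange_one_eq_nil (by omega)]
    simp
  | succ r ih =>
    intro hr
    have h1 : ((r + 1 : Nat) : Int) = (r : Int) + 1 := by push_cast; ring
    rw [h1, PySem.List.pyRange_one_succ_right (by omega), List.foldl_append, ih (by omega)]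
    simp only [List.foldl_cons, List.foldl_nil]
    set pre := (List.range r).map (fun i : Nat => (List.range n').map (fun j : Nat => pvCode cs ((i * n' + j : Nat) : Int))) with hpre
    have hprelen : pre.length = r := by simp [hpre]
    have hlen : r < (pre ++ List.replicate (R - r) (List.replicate n' (0 : Int))).length := by
      simp [hprelen]; omega
    have hrow : (pre ++ List.replicate (R - r) (List.replicate n' (0 : Int)))[r]! =
        List.replicate n' (0 : Int) := by
      rw [List.getElem!_eq_getElem?_getD, List.getElem?_eq_getElem hlen, Option.getD_some,
        List.getElem_append_right (by omega)]
      simp [hprelen]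
    rw [pvAinner_spec cs n' r _ hlen _ hrow]
    simp only [Prod.mk.injEq]
    refine ⟨?_, ?_⟩
    · rw [List.set_append, if_neg (by omega), hprelen, Nat.sub_self]
      have hrep : List.replicate (R - r) (List.replicate n' (0 : Int)) =
          List.replicate n' (0 : Int) :: List.replicate (R - (r + 1)) (List.replicate n' (0 : Int)) := by
        have : R - r = (R - (r + 1)) + 1 := by omega
        rw [this, List.replicate_succ]
      rw [hrep, List.set_cons_zero, List.range_succ, List.map_append, ← hpre, List.append_assoc]
      congr 2
    · push_cast; ring

-- one row of A's matrix is the corresponding slice of the flat code list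
lemma row_eq (cs : List Char) (n' R k : Nat) (hL : cs.length = R * n') (hk : k < R) :
    (List.range n').map (fun j : Nat => pvCode cs ((k * n' + j : Nat) : Int)) =
    ((cs.map (fun c => PySem.Int.mod ((c.toNat : Int)) 65)).drop (k * n')).take n' := by
  have hle : k * n' + n' ≤ cs.length := by
    rw [hL]
    have h1 : k + 1 ≤ R := hk
    calc k * n' + n' = (k + 1) * n' := by ring
    _ ≤ R * n' := Nat.mul_le_mul_right _ h1
  apply List.ext_getElem
  · simp; omega
  · intro j hj1 hj2
    simp only [List.getElem_map, List.getElem_range, List.getElem_take, List.getElem_drop]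
    have hidx : k * n' + j < cs.length := by simp at hj1; omega
    unfold pvCode
    rw [PySem.List.pyGetD_natCast, List.getD_eq_getElem _ _ hidx]

theorem getMessageMatrix_spec : Claim_equal_getMessageMatrix := by
  intro message n _ hpre
  unfold Pre_getMessageMatrix at hpre
  simp only [Spec_getMessageMatrix, getMessageMatrix, getMessageMatrix_alt]
  rcases lt_or_gt_of_ne hpre with hn | hn
  · -- n < 0: the row count is ≤ 0 on both sides, both return []
    set cs := pvPad message.toList n with hcs
    have h1 := PySem.Int.floordiv_mul_add_mod (cs.length : Int) n
    have h2 := PySem.Int.mod_neg_bounds (a := (cs.length : Int)) hn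
    have hrows : PySem.Int.floordiv (cs.length : Int) n ≤ 0 := by nlinarith [Int.natCast_nonneg cs.length]
    rw [PySem.List.pyRange_one_eq_nil hrows, pyRange_neg_eq_nil _ n hn (by positivity)]
    simp
  · -- n > 0
    obtain ⟨n', rfl⟩ : ∃ m : Nat, n = (m : Int) := ⟨n.toNat, by omega⟩
    have hn'0 : 0 < n' := by exact_mod_cast hn
    set cs := pvPad message.toList (n' : Int) with hcs
    have hmod := pvPad_mod message.toList (n' : Int) hn
    have hdvd : n' ∣ cs.length := by
      rw [← Int.natCast_dvd_natCast]
      exact Int.dvd_of_emod_eq_zero hmod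
    obtain ⟨R, hL⟩ : ∃ R, cs.length = R * n' := ⟨cs.length / n', (Nat.div_mul_cancel hdvd).symm⟩
    -- A's row count
    have hrows : PySem.Int.floordiv (cs.length : Int) (n' : Int) = (R : Int) := by
      rw [hL, PySem.Int.floordiv_natCast, Nat.mul_div_cancel _ hn'0]
    -- A's initial matrix
    have hmat : (PySem.List.pyRange 0 (R : Int) 1).map (fun _ => PySem.List.pyRepeat [(0 : Int)] (n' : Int))
        = List.replicate R (List.replicate n' (0 : Int)) := by
      rw [PySem.List.pyRepeat_singleton, List.map_const', PySem.List.length_pyRange_one]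
      simp
    rw [hrows, hmat, outer_spec cs n' R R le_rfl]
    simp only [Nat.sub_self, List.replicate_zero, List.append_nil]
    -- B's range over row starts
    have hcount : PySem.List.pyRange 0 ((cs.map (fun c => PySem.Int.mod ((c.toNat : Int)) 65)).length : Int) (n' : Int)
        = (List.range R).map (fun k : Nat => 0 + (n' : Int) * (k : Int)) := by
      rw [PySem.List.pyRange_of_pos _ _ hn]
      congr 2
      rw [List.length_map, hL]
      by_cases h0 : (0 : Int) < ((R * n' : Nat) : Int)
      · rw [if_pos h0]
        have harith : ((R * n' : Nat) : Int) - 0 + (n' : Int) - 1 = ((n' : Int) - 1) + (n' : Int) * (R : Int) := by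
          push_cast; ring
        rw [harith, Int.add_mul_ediv_left _ _ (by omega : (n' : Int) ≠ 0),
          Int.ediv_eq_zero_of_lt (by omega) (by omega)]
        omega
      · rw [if_neg h0]
        have hz : R = 0 := by by_contra hc; push_cast at h0; nlinarith [Nat.pos_of_ne_zero hc]
        omega
    rw [hcount, List.map_map]
    apply List.map_congr_left
    intro k hk
    have hkR : k < R := List.mem_range.mp hk
    have h1 : (0 : Int) + (n' : Int) * (k : Int) = ((k * n' : Nat) : Int) := by push_cast; ring
    simp only [Function.comp_apply, h1]
    rw [PySem.List.slice_natCast_add]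
    exact row_eq cs n' R k hL hkR
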